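-- pv_equiv track=rewrite | github.com/BrandonHoeft/CSV-to-SQL-from-dual-query | csv_to_sql.py | string_to_sql_date
-- ===== SOURCE A (Python) =====
-- def string_to_sql_date(list_obj, list_date_indices):
--     """takes a list of strings, and pass another list of indices representing
--     the elements that you want transformed to a date from a string to a PLSQL
--     compliant TO_DATE string to date format.
--     """
--
--     values_as_date = ["".join(["TO_DATE('", val, "', ", "'mm/dd/yyyy')"])
--                      for i, val in enumerate(list_obj)
--                      if i in list_date_indices]
--
--     for i in range(len(list_obj)):
--         if i in list_date_indices:
--             list_obj[i] = values_as_date.pop(0)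
--
--     return list_obj
-- ===== SOURCE B (Python) =====
-- def string_to_sql_date(list_obj, list_date_indices):
--     """Single in-place pass: wrap each selected element directly, no
--     intermediate list and no pop(0) FIFO."""
--     for i in range(len(list_obj)):
--         if i in list_date_indices:
--             list_obj[i] = "".join(["TO_DATE('", list_obj[i], "', 'mm/dd/yyyy')"])
--     return list_obj
-- ===== Notes on version B (the rewrite author's own statement) =====
-- stated objective: simpler
-- what changed: Drops A's build-then-consume structure (a filtered comprehension producing values_as_date, then a second loop popping it FIFO) in favour of one direct in-place pass that wraps each selected element where it stands.
import Mathlib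
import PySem

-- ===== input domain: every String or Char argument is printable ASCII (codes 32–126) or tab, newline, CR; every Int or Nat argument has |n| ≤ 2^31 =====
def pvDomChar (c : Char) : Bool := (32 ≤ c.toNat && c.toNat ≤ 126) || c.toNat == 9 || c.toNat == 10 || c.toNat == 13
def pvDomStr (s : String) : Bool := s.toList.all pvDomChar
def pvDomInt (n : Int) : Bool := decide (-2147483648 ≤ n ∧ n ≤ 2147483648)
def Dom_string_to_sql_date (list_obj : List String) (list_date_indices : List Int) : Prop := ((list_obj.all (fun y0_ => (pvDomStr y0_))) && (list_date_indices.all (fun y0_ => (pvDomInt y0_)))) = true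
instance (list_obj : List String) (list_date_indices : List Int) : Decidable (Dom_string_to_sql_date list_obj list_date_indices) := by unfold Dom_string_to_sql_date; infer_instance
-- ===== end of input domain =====

-- B replaces A's build-then-pop(0) two-phase structure with one direct in-place pass (simpler); both mutate list_obj in Python, equivalence proved on the return value.


-- ===== PORT A =====
-- "".join(["TO_DATE('", val, "', ", "'mm/dd/yyyy')"])
def pvWrapA (val : String) : String :=
  PySem.Str.join "" ["TO_DATE('", val, "', ", "'mm/dd/yyyy')"]

def string_to_sql_date (list_obj : List String) (list_date_indices : List Int) : List String :=
  -- values_as_date = [... for i, val in enumerate(list_obj) if i in list_date_indices]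
  let values_as_date :=
    ((PySem.List.enumerate list_obj).filter (fun p => list_date_indices.contains p.1)).map
      (fun p => pvWrapA p.2)
  -- for i in range(len(list_obj)): if i in list_date_indices: list_obj[i] = values_as_date.pop(0)
  let final :=
    (PySem.List.pyRange 0 (list_obj.length : Int) 1).foldl
      (fun (st : List String × List String) i =>
        if list_date_indices.contains i then
          match st.2 with
          | v :: rest => (PySem.List.pySetD st.1 i v, rest)
          | [] => (st.1, [])   -- pop(0) on an empty list would raise; unreachable here (counts match)
        else st)
      (list_obj, values_as_date)
  final.1

-- ===== PORT B =====
-- "".join(["TO_DATE('", list_obj[i], "', 'mm/dd/yyyy')"])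
def pvWrapB (val : String) : String :=
  PySem.Str.join "" ["TO_DATE('", val, "', 'mm/dd/yyyy')"]

-- the single in-place pass of Source B: index counter i, wrap the element when i is selected
def pvPassB (list_date_indices : List Int) (i : Int) : List String → List String
  | [] => []
  | v :: rest =>
      (if list_date_indices.contains i then pvWrapB v else v) :: pvPassB list_date_indices (i + 1) rest

def string_to_sql_date_alt (list_obj : List String) (list_date_indices : List Int) : List String :=
  pvPassB list_date_indices 0 list_obj

-- ===== PRECONDITION & SPEC =====
def Spec_string_to_sql_date (list_obj : List String) (list_date_indices : List Int) (out : List String) : Prop := out = string_to_sql_date_alt list_obj list_date_indices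
instance (list_obj : List String) (list_date_indices : List Int) (out : List String) : Decidable (Spec_string_to_sql_date list_obj list_date_indices out) := by unfold Spec_string_to_sql_date; infer_instance

-- ===== CLAIM (what is proved, stated in full; the proofs are below) =====
def Claim_equal_string_to_sql_date : Prop := ∀ (list_obj : List String) (list_date_indices : List Int), Dom_string_to_sql_date list_obj list_date_indices → Spec_string_to_sql_date list_obj list_date_indices (string_to_sql_date list_obj list_date_indices)

-- ===== LEMMAS AND PROOFS =====

-- the two wrap expressions build the same string
theorem pvWrapB_eq (v : String) : pvWrapB v = pvWrapA v := by
  simp [pvWrapA, pvWrapB, PySem.Str.join, PySem.Chars.join, List.intercalate]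

-- the selected-and-wrapped values of a suffix whose first element has index k
def pvSel (idxs : List Int) (k : Int) : List String → List String
  | [] => []
  | v :: rest =>
      if idxs.contains k then pvWrapA v :: pvSel idxs (k + 1) rest else pvSel idxs (k + 1) rest

-- A's comprehension computes pvSel
theorem pvSel_eq_comprehension (idxs : List Int) (xs : List String) (k : Int) :
    ((PySem.List.enumerate xs k).filter (fun p => idxs.contains p.1)).map (fun p => pvWrapA p.2)
      = pvSel idxs k xs := by
  induction xs generalizing k with
  | nil => simp [PySem.List.enumerate_nil, pvSel]
  | cons v rest ih =>
      rw [PySem.List.enumerate_cons, List.filter_cons]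
      by_cases h : k ∈ idxs <;> simpa [pvSel, h, List.contains_eq_mem] using ih (k + 1)

-- main invariant of A's second loop: starting past a processed prefix `pre`,
-- it rewrites the suffix exactly as B's single pass does
theorem pvLoopA_eq (idxs : List Int) (suffix : List String) : ∀ (pre : List String) (k : Int),
    k = (pre.length : Int) →
    (PySem.List.pyRange k (k + suffix.length) 1).foldl
      (fun (st : List String × List String) i =>
        if idxs.contains i then
          match st.2 with
          | v :: rest => (PySem.List.pySetD st.1 i v, rest)
          | [] => (st.1, [])
        else st)
      (pre ++ suffix, pvSel idxs k suffix)
    = (pre ++ pvPassB idxs k suffix, []) := by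
  induction suffix with
  | nil => intro pre k _; simp [pvSel, pvPassB, PySem.List.pyRange_one_eq_nil]
  | cons v rest ih =>
      intro pre k hk
      have hcons : PySem.List.pyRange k (k + (v :: rest).length) 1
          = k :: PySem.List.pyRange (k + 1) (k + (v :: rest).length) 1 := by
        apply PySem.List.pyRange_one_cons
        simp only [List.length_cons]; omega
      have hend : k + ((v :: rest).length : Int) = (k + 1) + (rest.length : Int) := by
        simp only [List.length_cons]; push_cast; omega
      rw [hcons, List.foldl_cons, hend]
      by_cases h : idxs.contains k
      · have hset : PySem.List.pySetD (pre ++ v :: rest) k (pvWrapA v)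
            = pre ++ pvWrapA v :: rest := by
          have hs := PySem.List.pySet?_natCast (xs := pre ++ v :: rest) (n := pre.length)
            (v := pvWrapA v) (by simp)
          rw [hk]
          simp only [PySem.List.pySetD, hs, Option.getD_some,
            List.set_append_right _ _ (le_refl _), Nat.sub_self, List.set_cons_zero]
        have ih' := ih (pre ++ [pvWrapA v]) (k + 1) (by simp [hk])
        simp only [pvSel, pvPassB, h, if_pos, pvWrapB_eq]
        rw [hset]
        simpa using ih'
      · have ih' := ih (pre ++ [v]) (k + 1) (by simp [hk])
        simp only [pvSel, pvPassB, h, if_neg, Bool.false_eq_true, not_false_iff]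
        simpa using ih'

-- ===== VERDICT (by name: the statement is the Claim_ definition above) =====
theorem string_to_sql_date_spec : Claim_equal_string_to_sql_date := by
  intro list_obj list_date_indices _
  unfold Spec_string_to_sql_date string_to_sql_date string_to_sql_date_alt
  have h := pvLoopA_eq list_date_indices list_obj [] 0 (by simp)
  simp only [List.nil_append, zero_add] at h
  rw [pvSel_eq_comprehension list_date_indices list_obj 0] 
  simp only [h]
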